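-- pv_equiv track=rewrite | github.com/XiaotongShen/Data-Structure-and-Algorithm | Zuo/Basic/Class28/Code02_AddShortestEnd.py | manacher_string
-- ===== SOURCE A (Python) =====
-- def manacher_string(s: str):
--     res = ''
--     n = len(s) * 2 + 1
--     idx = 0
--     for i in range(n):
--         if (i & 1) == 0:
--             res += '#'
--         else:
--             res += s[idx]
--             idx += 1
--     return res
-- ===== SOURCE B (Python) =====
-- def manacher_string(s: str):
--     return '#'.join([''] + list(s) + [''])
-- ===== Notes on version B (the rewrite author's own statement) =====
-- stated objective: simpler
-- what changed: Replaces the parity-branched index loop over 2n+1 positions (with a separately maintained source index) by a single separator-join over the character list wrapped in two sentinel empty strings, which yields the leading/trailing separators and the single-separator result on empty input.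
import Mathlib
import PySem

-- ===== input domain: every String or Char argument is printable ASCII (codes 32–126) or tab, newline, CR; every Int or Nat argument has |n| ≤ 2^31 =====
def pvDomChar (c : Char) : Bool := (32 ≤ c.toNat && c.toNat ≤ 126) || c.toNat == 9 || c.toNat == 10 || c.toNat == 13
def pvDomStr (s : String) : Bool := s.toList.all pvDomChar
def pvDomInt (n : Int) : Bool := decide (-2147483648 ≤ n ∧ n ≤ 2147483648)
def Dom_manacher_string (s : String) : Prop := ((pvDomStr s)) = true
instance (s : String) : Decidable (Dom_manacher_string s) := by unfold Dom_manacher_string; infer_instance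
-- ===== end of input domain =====

-- B replaces A's parity-branched index loop by a single '#'.join over [''] + list(s) + ['']; same return value, simpler construction.

-- ===== PORT A =====
-- loop body of A: on even i append '#', on odd i append s[idx] and bump idx
-- (the IndexError branch of s[idx] is unreachable: idx < len(s) whenever i is odd)
def stepA (cs : List Char) (st : List Char × Int) (i : Int) : List Char × Int :=
  if PySem.Int.mod i 2 == 0 then (st.1 ++ ['#'], st.2)
  else
    match PySem.List.pyGet? cs st.2 with
    | some c => (st.1 ++ [c], st.2 + 1)
    | none => (st.1, st.2 + 1)

def manacher_string (s : String) : String :=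
  let n : Int := PySem.Str.len s * 2 + 1
  let st := (PySem.List.pyRange 0 n 1).foldl (stepA s.toList) ([], 0)
  String.ofList st.1

-- ===== PORT B =====
def manacher_string_alt (s : String) : String :=
  PySem.Str.join "#" ([""] ++ s.toList.map (fun c => String.ofList [c]) ++ [""])

-- ===== PRECONDITION & SPEC =====
def Spec_manacher_string (s : String) (out : String) : Prop := out = manacher_string_alt s
instance (s : String) (out : String) : Decidable (Spec_manacher_string s out) := by unfold Spec_manacher_string; infer_instance

-- ===== CLAIM (what is proved, stated in full; the proofs are below) =====
def Claim_equal_manacher_string : Prop := ∀ (s : String), Dom_manacher_string s → Spec_manacher_string s (manacher_string s)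

-- ===== LEMMAS AND PROOFS =====

-- the common value both ports compute: '#' interleaved around the characters
def inter : List Char → List Char
  | [] => ['#']
  | c :: cs => '#' :: c :: inter cs

lemma joinAux (cs : List Char) : ∀ (p : List Char),
    PySem.Chars.join ['#'] (p :: (cs.map (fun c => [c]) ++ [[]])) = p ++ inter cs := by
  induction cs with
  | nil =>
    intro p
    simp [PySem.Chars.join_cons_cons, PySem.Chars.join_singleton, inter]
  | cons c cs ih =>
    intro p
    simp only [List.map_cons, List.cons_append]
    rw [PySem.Chars.join_cons_cons, ih [c]]
    simp [inter]

lemma joinB (cs : List Char) :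
    PySem.Chars.join ['#'] ([[]] ++ cs.map (fun c => [c]) ++ [[]]) = inter cs := by
  simpa using joinAux cs []

lemma loopA (rest : List Char) : ∀ (cs : List Char) (k : Nat) (acc : List Char),
    cs.drop k = rest → k ≤ cs.length →
    (PySem.List.pyRange (2 * (k : Int)) (2 * (cs.length : Int) + 1) 1).foldl
        (stepA cs) (acc, (k : Int))
      = (acc ++ inter rest, (cs.length : Int)) := by
  induction rest with
  | nil =>
    intro cs k acc hdrop hk
    have hkl : k = cs.length := by
      have := List.drop_eq_nil_iff.mp hdrop; omega
    subst hkl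
    rw [PySem.List.pyRange_one_cons (by omega)]
    rw [PySem.List.pyRange_one_eq_nil (by omega)]
    simp [stepA, PySem.Int.mod, inter]
  | cons c rest ih =>
    intro cs k acc hdrop hk
    have hklt : k < cs.length := by
      by_contra h
      rw [List.drop_eq_nil_iff.mpr (by omega)] at hdrop
      simp at hdrop
    have hget : cs[k]? = some c := by
      have h0 : (cs.drop k)[0]? = some c := by rw [hdrop]; rfl
      simpa using h0
    rw [PySem.List.pyRange_one_cons (by omega), PySem.List.pyRange_one_cons (by omega)]
    simp only [List.foldl_cons]
    have heven : stepA cs (acc, (k : Int)) (2 * (k : Int)) = (acc ++ ['#'], (k : Int)) := by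
      simp [stepA, PySem.Int.mod]
    rw [heven]
    have hodd : stepA cs (acc ++ ['#'], (k : Int)) (2 * (k : Int) + 1) =
        (acc ++ ['#'] ++ [c], (k : Int) + 1) := by
      have hm : PySem.Int.mod (2 * (k : Int) + 1) 2 = 1 := by
        simp [PySem.Int.mod]
      have hg : PySem.List.pyGet? cs ((k : Int)) = some c := by
        simpa [PySem.List.pyGet?_natCast] using hget
      simp [stepA, hg]
    rw [hodd]
    have hdrop' : cs.drop (k + 1) = rest := by
      have : (cs.drop k).tail = rest := by rw [hdrop]; rfl
      simpa [List.tail_drop] using this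
    have := ih cs (k + 1) (acc ++ ['#'] ++ [c]) hdrop' (by omega)
    have harg : (2 * ((k : Int)) + 1 + 1) = 2 * (((k + 1 : Nat)) : Int) := by push_cast; ring
    rw [harg]
    push_cast at this ⊢
    rw [this]
    simp [inter]

lemma manacher_string_eq_inter (s : String) :
    manacher_string s = String.ofList (inter s.toList) := by
  unfold manacher_string
  have := loopA s.toList s.toList 0 [] (by simp) (by omega)
  simp only [Nat.cast_zero, mul_zero] at this
  simp only [PySem.Str.len_eq]
  norm_num at this ⊢
  rw [mul_comm] at this
  rw [this]

lemma manacher_string_alt_eq_inter (s : String) :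
    manacher_string_alt s = String.ofList (inter s.toList) := by
  have h : (manacher_string_alt s).toList = inter s.toList := by
    unfold manacher_string_alt
    rw [PySem.Str.toList_join]
    simp only [List.map_append, List.map_map, List.map_cons, List.map_nil]
    have hfun : (String.toList ∘ fun c => String.ofList [c]) = (fun c : Char => [c]) := by
      funext c; simp
    simpa [hfun] using joinB s.toList
  calc manacher_string_alt s = String.ofList (manacher_string_alt s).toList := by
        rw [String.ofList_toList]
    _ = String.ofList (inter s.toList) := by rw [h]

-- ===== VERDICT (by name: the statement is the Claim_ definition above) =====
theorem manacher_string_spec : Claim_equal_manacher_string := by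
  intro s _
  unfold Spec_manacher_string
  rw [manacher_string_eq_inter, manacher_string_alt_eq_inter]
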